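-- pv_equiv track=rewrite | github.com/tronglinh23/CTF_challs | cookiearena/programming/charland/test.py | charland_resident_name
-- ===== SOURCE A (Python) =====
-- def is_prime(n):
--     if n < 2:
--         return False
--     for i in range(2, int(n**0.5) + 1):
--         if n % i == 0:
--             return False
--     return True
--
-- def get_fibonacci_numbers(n):
--     fibonacci = [1, 1]
--     while len(fibonacci) < n:
--         next_number = fibonacci[-1] + fibonacci[-2]
--         fibonacci.append(next_number)
--     return fibonacci
--
-- def charland_resident_name(n):
--     primes = set()
--     fibonacci_numbers = set(get_fibonacci_numbers(n))
--
--     for i in range(1, n + 1):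
--         if is_prime(i) and i in fibonacci_numbers:
--             primes.add(i)
--
--     name = ''
--     for i in range(1, n + 1):
--         if i in primes:
--             name += 'p'
--         elif i in fibonacci_numbers:
--             name += 'O'
--         elif is_prime(i):
--             name += 'P'
--         else:
--             name += 'o'
--
--     return name
-- ===== SOURCE B (Python) =====
-- def charland_resident_name(n):
--     if n < 1:
--         return ''
--     # set-based Sieve of Eratosthenes: collect composites once
--     comps = set()
--     for p in range(2, n + 1):
--         for q in range(2 * p, n + 1, p):
--             comps.add(q)
--     # only the Fibonacci numbers <= n
--     fibs = set()
--     a, b = 1, 1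
--     while a <= n:
--         fibs.add(a)
--         a, b = b, a + b
--     out = []
--     for i in range(1, n + 1):
--         fib = i in fibs
--         prime = i >= 2 and i not in comps
--         out.append('p' if prime and fib else 'O' if fib else 'P' if prime else 'o')
--     return ''.join(out)
-- ===== Notes on version B (the rewrite author's own statement) =====
-- stated objective: faster
-- what changed: Replaced A's per-number trial-division primality test (run twice per position) and its first-n bignum Fibonacci list by a single composite sieve (Sieve of Eratosthenes, set-based) plus generation of only the Fibonacci numbers <= n, assembling the string with join instead of repeated +=.
-- intended difference: At n = 2 and n = 3 A's helper returns only the first n Fibonacci numbers, missing the Fibonacci number n itself, so A marks position n 'P' (A(2) = 'OP'); B returns the intended 'p' there (B(2) = 'Op'), since 2 and 3 are both prime and Fibonacci. — e.g. on charland_resident_name(2): A returns "OP", B returns "Op"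
import Mathlib
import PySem

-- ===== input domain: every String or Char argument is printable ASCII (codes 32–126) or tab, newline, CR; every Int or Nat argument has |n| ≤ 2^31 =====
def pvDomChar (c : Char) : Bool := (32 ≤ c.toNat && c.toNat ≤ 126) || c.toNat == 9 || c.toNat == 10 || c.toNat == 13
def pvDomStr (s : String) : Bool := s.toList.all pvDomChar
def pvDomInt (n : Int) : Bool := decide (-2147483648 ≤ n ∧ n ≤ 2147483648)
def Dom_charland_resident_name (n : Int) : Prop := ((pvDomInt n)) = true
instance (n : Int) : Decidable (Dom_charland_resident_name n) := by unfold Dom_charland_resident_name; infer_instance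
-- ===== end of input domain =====

-- B replaces A's per-number trial division and first-n Fibonacci list by a composite sieve
-- and by generating only the Fibonacci numbers ≤ n (objective: faster; A's misses at n=2,3 are stated as D_).

-- ===== PORT A =====
-- int(n**0.5): for 0 ≤ n ≤ 2^31 this is exactly the floor square root (doubles are exact in
-- this range); ported by hand as a kernel-reducible count-up floor-sqrt (proved = Nat.sqrt below).
def pvISqrtAux : Nat → Nat → Nat → Nat
  | 0, _, r => r
  | f+1, n, r => if (r+1)*(r+1) ≤ n then pvISqrtAux f n (r+1) else r
def pvISqrt (n : Nat) : Nat := pvISqrtAux n n 0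

-- is_prime: the for-loop with early 'return False' is the 'any' of the divisor tests
def pvIsPrimeA (n : Int) : Bool :=
  if n < 2 then false
  else !((PySem.List.pyRange 2 ((pvISqrt n.toNat : Int) + 1) 1).any
          (fun i => PySem.Int.mod n i == 0))

-- get_fibonacci_numbers: the while-loop appends once per iteration, growing the list from
-- length 2 until its length is ≥ n, so it runs exactly (n-2).toNat times.
-- fibonacci[-1] / fibonacci[-2] always exist (length ≥ 2); .getD 0 is never used.
def pvFibStepA : Nat → List Int → List Int
  | 0, acc => acc
  | k+1, acc =>
      pvFibStepA k (acc ++ [((PySem.List.pyGet? acc (-1)).getD 0) +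
                            ((PySem.List.pyGet? acc (-2)).getD 0)])

def pvGetFibA (n : Int) : List Int := pvFibStepA (n - 2).toNat [1, 1]

-- fibonacci_numbers = set(get_fibonacci_numbers(n))
def pvFibSetA (n : Int) : PySem.Set Int := PySem.Set.ofList (pvGetFibA n)

-- primes = {i for i in 1..n if is_prime(i) and i in fibonacci_numbers} (A's first loop)
def pvPrimesA (n : Int) : PySem.Set Int :=
  let fibSet := pvFibSetA n
  (PySem.List.pyRange 1 (n+1) 1).foldl
    (fun s i => if pvIsPrimeA i && PySem.Set.contains fibSet i
                then PySem.Set.add s i else s)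
    PySem.Set.empty

-- the name string is accumulated on the List Char side (name += c), final String.ofList
def charland_resident_name (n : Int) : String :=
  let fibSet := pvFibSetA n
  let primes := pvPrimesA n
  String.ofList ((PySem.List.pyRange 1 (n+1) 1).foldl
    (fun cs i =>
      cs ++ [if PySem.Set.contains primes i then 'p'
             else if PySem.Set.contains fibSet i then 'O'
             else if pvIsPrimeA i then 'P'
             else 'o']) [])

-- ===== PORT B =====
-- composite sieve: comps = all multiples 2p, 3p, … ≤ n of every p in 2..n
def pvCompsB (n : Int) : PySem.Set Int :=
  (PySem.List.pyRange 2 (n+1) 1).foldl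
    (fun s p => (PySem.List.pyRange (2*p) (n+1) p).foldl (fun s q => PySem.Set.add s q) s)
    PySem.Set.empty

-- while a <= n: fibs.add(a); a, b = b, a + b  — fuel n.toNat + 2 suffices: after k
-- iterations a is the k-th Fibonacci number, which is ≥ k, so the guard fails within fuel.
def pvFibLoopB : Nat → Int → Int → Int → PySem.Set Int → PySem.Set Int
  | 0, _, _, _, s => s
  | f+1, a, b, n, s => if a ≤ n then pvFibLoopB f b (a+b) n (PySem.Set.add s a) else s

def pvFibsB (n : Int) : PySem.Set Int := pvFibLoopB (n.toNat + 2) 1 1 n PySem.Set.empty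

-- ''.join of the per-position one-char strings
def charland_resident_name_alt (n : Int) : String :=
  if n < 1 then "" else
  let comps := pvCompsB n
  let fibs := pvFibsB n
  PySem.Str.join "" ((PySem.List.pyRange 1 (n+1) 1).map (fun i =>
    let fib := PySem.Set.contains fibs i
    let prime := decide (2 ≤ i) && !(PySem.Set.contains comps i)
    if prime && fib then "p" else if fib then "O" else if prime then "P" else "o"))

-- ===== PRECONDITION & SPEC =====
-- At n = 2 and n = 3, A's fib list holds only the FIRST n Fibonacci numbers and so misses the
-- Fibonacci number n itself: A marks position n 'P' where B returns the intended 'p'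
-- (2 and 3 are both prime and Fibonacci).
def D_charland_resident_name (n : Int) : Prop := n = 2 ∨ n = 3
instance (n : Int) : Decidable (D_charland_resident_name n) := by
  unfold D_charland_resident_name; infer_instance

def Spec_charland_resident_name (n : Int) (out : String) : Prop :=
  ¬ D_charland_resident_name n → out = charland_resident_name_alt n
instance (n : Int) (out : String) : Decidable (Spec_charland_resident_name n out) := by
  unfold Spec_charland_resident_name; infer_instance

def pvDiffWitness_charland_resident_name : Int := 2
def pvDiffWitnessOut_charland_resident_name : String × String := ("OP", "Op")

-- ===== CLAIM (what is proved, stated in full; the proofs are below) =====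
def Claim_unchanged_charland_resident_name : Prop :=
  ∀ (n : Int), Dom_charland_resident_name n →
    Spec_charland_resident_name n (charland_resident_name n)
def Claim_changed_charland_resident_name : Prop :=
  Dom_charland_resident_name (pvDiffWitness_charland_resident_name) ∧
  D_charland_resident_name (pvDiffWitness_charland_resident_name) ∧
  charland_resident_name (pvDiffWitness_charland_resident_name) = pvDiffWitnessOut_charland_resident_name.1 ∧
  charland_resident_name_alt (pvDiffWitness_charland_resident_name) = pvDiffWitnessOut_charland_resident_name.2 ∧
  pvDiffWitnessOut_charland_resident_name.1 ≠ pvDiffWitnessOut_charland_resident_name.2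
def Claim_exact_charland_resident_name : Prop :=
  ∀ (n : Int), Dom_charland_resident_name n → D_charland_resident_name n →
    charland_resident_name n ≠ charland_resident_name_alt n

-- ===== LEMMAS AND PROOFS =====
def pvF : Nat → Int
  | 0 => 1
  | 1 => 1
  | k+2 => pvF k + pvF (k+1)

theorem pvF_pos : ∀ k, 1 ≤ pvF k := by
  intro k
  induction k using Nat.strong_induction_on with
  | _ k ih =>
    match k with
    | 0 => decide
    | 1 => decide
    | k+2 =>
      have h1 := ih k (by omega)
      have h2 := ih (k+1) (by omega)
      simp only [pvF]; omega

theorem pvF_le_succ : ∀ k, pvF k ≤ pvF (k+1) := by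
  intro k
  match k with
  | 0 => decide
  | k+1 => have := pvF_pos k; simp only [pvF]; omega

theorem pvF_mono : ∀ j k, j ≤ k → pvF j ≤ pvF k := by
  intro j k h
  induction k with
  | zero => rw [Nat.le_zero.mp h]
  | succ k ih =>
    rcases Nat.lt_or_ge j (k+1) with h' | h'
    · exact le_trans (ih (by omega)) (pvF_le_succ k)
    · have : j = k+1 := by omega
      simp [this]

theorem pvF_ge : ∀ (k : Nat), (k : Int) ≤ pvF k := by
  intro k
  induction k using Nat.strong_induction_on with
  | _ k ih =>
    match k with
    | 0 => decide
    | 1 => decide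
    | 2 => decide
    | k+3 =>
      have h1 := ih (k+1) (by omega)
      have h2 := ih (k+2) (by omega)
      have h3 := pvF_pos (k+1)
      simp only [pvF] at *
      push_cast at *
      omega

theorem pvF_gt_of_ge_four : ∀ (k : Nat), 4 ≤ k → (k : Int) < pvF k := by
  intro k hk
  match k, hk with
  | k+4, _ =>
    have h1 := pvF_ge (k+2)
    have h2 := pvF_ge (k+3)
    show (((k+4 : Nat) : Int)) < pvF (k+2) + pvF (k+3)
    push_cast at *
    omega

theorem pvFibStepA_map (k : Nat) : ∀ m, 2 ≤ m →
    pvFibStepA k ((List.range m).map pvF) = (List.range (m + k)).map pvF := by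
  induction k with
  | zero => intro m _; rfl
  | succ k ih =>
    intro m hm
    obtain ⟨j, rfl⟩ : ∃ j, m = j + 2 := ⟨m - 2, by omega⟩
    have hlen : ((List.range (j+2)).map pvF).length = j + 2 := by simp
    have h1 : PySem.List.pyGet? ((List.range (j+2)).map pvF) (-1)
        = some (pvF (j+1)) := by
      rw [PySem.List.pyGet?_neg_one]
      rw [List.getLast?_eq_getElem?]
      simp [hlen]
    have h2 : PySem.List.pyGet? ((List.range (j+2)).map pvF) (-2)
        = some (pvF j) := by
      rw [PySem.List.pyGet?_neg_ofNat _ 2 (by omega) (by simp)]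
      simp [hlen]
    simp only [pvFibStepA, h1, h2, Option.getD_some]
    have h3 : (List.range (j+2)).map pvF ++ [pvF (j+1) + pvF j]
        = (List.range (j+3)).map pvF := by
      have hF : pvF (j+1) + pvF j = pvF (j+2) := by
        have : pvF (j+2) = pvF j + pvF (j+1) := rfl
        omega
      rw [hF]
      conv_rhs => rw [show j+3 = (j+2)+1 from rfl, List.range_succ]
      simp
    rw [h3]
    have := ih (j+3) (by omega)
    rw [this]
    have harg : j + 3 + k = j + 2 + (k + 1) := by omega
    rw [harg]

theorem pvGetFibA_eq (n : Int) : pvGetFibA n = (List.range (max 2 n.toNat)).map pvF := by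
  have h : [ (1:Int), 1 ] = (List.range 2).map pvF := by decide
  unfold pvGetFibA
  rw [h, pvFibStepA_map _ 2 (by omega)]
  have : 2 + (n-2).toNat = max 2 n.toNat := by omega
  rw [this]

theorem pvFibLoopB_mem (fuel : Nat) : ∀ (j : Nat) (n : Int) (s : PySem.Set Int),
    n < pvF (j + fuel) →
    ∀ x, x ∈ pvFibLoopB fuel (pvF j) (pvF (j+1)) n s ↔
      x ∈ s ∨ ∃ k, j ≤ k ∧ pvF k = x ∧ x ≤ n := by
  induction fuel with
  | zero =>
    intro j n s hf x
    simp only [pvFibLoopB]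
    constructor
    · exact Or.inl
    · rintro (h | ⟨k, hk, rfl, hle⟩)
      · exact h
      · exact absurd (lt_of_le_of_lt hle hf) (not_lt.mpr (pvF_mono j k hk))
  | succ fuel ih =>
    intro j n s hf x
    simp only [pvFibLoopB]
    split
    · rename_i hguard
      have harg : pvF j + pvF (j+1) = pvF (j+1+1) := rfl
      rw [harg]
      have hf' : n < pvF (j + 1 + fuel) := by
        have : j + 1 + fuel = j + (fuel + 1) := by omega
        rw [this]; exact hf
      rw [ih (j+1) n _ hf' x, PySem.Set.mem_add]
      constructor
      · rintro ((h | rfl) | ⟨k, hk, rfl, hle⟩)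
        · exact Or.inl h
        · exact Or.inr ⟨j, le_refl j, rfl, hguard⟩
        · exact Or.inr ⟨k, by omega, rfl, hle⟩
      · rintro (h | ⟨k, hk, rfl, hle⟩)
        · exact Or.inl (Or.inl h)
        · rcases Nat.eq_or_lt_of_le hk with rfl | hk'
          · exact Or.inl (Or.inr rfl)
          · exact Or.inr ⟨k, by omega, rfl, hle⟩
    · rename_i hguard
      constructor
      · exact Or.inl
      · rintro (h | ⟨k, hk, rfl, hle⟩)
        · exact h
        · have hm := pvF_mono j k hk
          have hn := not_le.mp hguard
          omega

theorem pvFibsB_mem (n : Int) (x : Int) :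
    x ∈ pvFibsB n ↔ (∃ k, pvF k = x) ∧ x ≤ n := by
  have hf : n < pvF (0 + (n.toNat + 2)) := by
    have h1 := pvF_ge (n.toNat + 2)
    have : ((n.toNat + 2 : Nat) : Int) = (n.toNat : Int) + 2 := by push_cast; ring
    rw [Nat.zero_add]
    omega
  have h := pvFibLoopB_mem (n.toNat + 2) 0 n PySem.Set.empty hf x
  unfold pvFibsB
  have h' : x ∈ pvFibLoopB (n.toNat + 2) 1 1 n PySem.Set.empty ↔
      x ∈ PySem.Set.empty ∨ ∃ k, 0 ≤ k ∧ pvF k = x ∧ x ≤ n := h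
  rw [h']
  simp only [PySem.Set.empty]
  constructor
  · rintro (h | ⟨k, _, rfl, hle⟩)
    · simp at h
    · exact ⟨⟨k, rfl⟩, hle⟩
  · rintro ⟨⟨k, rfl⟩, hle⟩
    exact Or.inr ⟨k, Nat.zero_le k, rfl, hle⟩

theorem fib_mem_agree (n i : Int) (h1 : 1 ≤ i) (h2 : i ≤ n)
    (hD : ¬ D_charland_resident_name n) :
    (i ∈ pvGetFibA n) ↔ i ∈ pvFibsB n := by
  rw [pvGetFibA_eq, pvFibsB_mem, List.mem_map]
  constructor
  · rintro ⟨k, _, rfl⟩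
    exact ⟨⟨k, rfl⟩, h2⟩
  · rintro ⟨⟨k, rfl⟩, _⟩
    refine ⟨k, List.mem_range.mpr ?_, rfl⟩
    have hge := pvF_ge k
    by_contra hk
    push Not at hk
    have hk2 : 2 ≤ k := by omega
    have hkn : n.toNat ≤ k := by omega
    have hkInt : (k : Int) ≤ n := le_trans hge h2
    have hn4 : 4 ≤ n := by
      unfold D_charland_resident_name at hD
      push Not at hD
      omega
    have hk4 : 4 ≤ k := by omega
    have := pvF_gt_of_ge_four k hk4
    omega

theorem pvISqrtAux_eq (f : Nat) : ∀ n r, r * r ≤ n → Nat.sqrt n ≤ r + f →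
    pvISqrtAux f n r = Nat.sqrt n := by
  induction f with
  | zero =>
    intro n r hx h2
    have h4 : r ≤ Nat.sqrt n := Nat.le_sqrt.mpr hx
    simp [pvISqrtAux]; omega
  | succ f ih =>
    intro n r hx h2
    simp only [pvISqrtAux]
    split
    · exact ih n (r+1) (by assumption) (by omega)
    · have h3 : Nat.sqrt n < r + 1 := by rw [Nat.sqrt_lt]; omega
      have h4 : r ≤ Nat.sqrt n := Nat.le_sqrt.mpr hx
      omega
theorem pvISqrt_eq (n : Nat) : pvISqrt n = Nat.sqrt n := by
  have := Nat.sqrt_le_self n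
  exact pvISqrtAux_eq n n 0 (by omega) (by omega)

theorem pvIsPrimeA_iff (i : Int) (h0 : 0 ≤ i) : pvIsPrimeA i = true ↔ Nat.Prime i.toNat := by
  unfold pvIsPrimeA
  split
  · rename_i hlt
    simp only [Bool.false_eq_true, false_iff]
    intro hp
    have := hp.two_le
    omega
  · rename_i hge
    push Not at hge
    rw [Bool.not_eq_true', List.any_eq_false, Nat.prime_def_le_sqrt]
    constructor
    · intro hall
      refine ⟨by omega, fun m h2m hms hdvd => ?_⟩
      have hmem : ((m : Int)) ∈ PySem.List.pyRange 2 ((pvISqrt i.toNat : Int) + 1) 1 := by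
        rw [PySem.List.mem_pyRange_one, pvISqrt_eq]
        have : ((m:Int)) ≤ ((Nat.sqrt i.toNat : Int)) := by exact_mod_cast hms
        constructor
        · exact_mod_cast h2m
        · omega
      have hthis := hall _ hmem
      apply hthis
      rw [beq_iff_eq, PySem.Int.mod_eq_zero_iff_dvd]
      have hdv : ((m:Int)) ∣ ((i.toNat : Int)) := Int.natCast_dvd_natCast.mpr hdvd
      rwa [Int.toNat_of_nonneg h0] at hdv
    · rintro ⟨h2, hall⟩ d hd
      rw [PySem.List.mem_pyRange_one, pvISqrt_eq] at hd
      rw [beq_iff_eq]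
      intro hmod
      rw [PySem.Int.mod_eq_zero_iff_dvd] at hmod
      have hd0 : 0 ≤ d := by omega
      have hdvdN : d.toNat ∣ i.toNat := by
        have : ((d.toNat : Int)) ∣ ((i.toNat : Int)) := by
          rwa [Int.toNat_of_nonneg hd0, Int.toNat_of_nonneg h0]
        exact_mod_cast this
      exact hall d.toNat (by omega) (by omega) hdvdN

theorem foldl_foldl_add_mem (L : List Int) (g : Int → List Int) :
    ∀ (s : PySem.Set Int) (x : Int),
      x ∈ L.foldl (fun s p => (g p).foldl (fun s q => PySem.Set.add s q) s) s ↔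
        x ∈ s ∨ ∃ p ∈ L, x ∈ g p := by
  induction L with
  | nil => intro s x; simp
  | cons p L ih =>
    intro s x
    simp only [List.foldl_cons]
    rw [ih]
    rw [PySem.Set.mem_foldl_add (g p) (fun q => q) s x]
    constructor
    · rintro ((h | ⟨b, hb, rfl⟩) | ⟨p', hp', hx⟩)
      · exact Or.inl h
      · exact Or.inr ⟨p, List.mem_cons_self .., hb⟩
      · exact Or.inr ⟨p', List.mem_cons_of_mem _ hp', hx⟩
    · rintro (h | ⟨p', hp', hx⟩)
      · exact Or.inl (Or.inl h)
      · rcases List.mem_cons.mp hp' with rfl | hmem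
        · exact Or.inl (Or.inr ⟨x, hx, rfl⟩)
        · exact Or.inr ⟨p', hmem, hx⟩

theorem pvCompsB_mem (n x : Int) :
    x ∈ pvCompsB n ↔ ∃ p m : Int, 2 ≤ p ∧ 2 ≤ m ∧ p * m = x ∧ x ≤ n := by
  unfold pvCompsB
  rw [foldl_foldl_add_mem]
  simp only [PySem.Set.empty]
  constructor
  · rintro (h | ⟨p, hp, hx⟩)
    · simp at h
    · rw [PySem.List.mem_pyRange_one] at hp
      rw [PySem.List.mem_pyRange_iff_of_pos (by omega)] at hx
      obtain ⟨h1, h2, t, ht⟩ := hx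
      have hpt : 0 ≤ p * t := by omega
      have ht0 : 0 ≤ t := by nlinarith
      refine ⟨p, 2 + t, by omega, by omega, by linear_combination -ht, by omega⟩
  · rintro ⟨p, m, hp, hm, rfl, hle⟩
    refine Or.inr ⟨p, ?_, ?_⟩
    · rw [PySem.List.mem_pyRange_one]
      have h1 : p ≤ p * m := le_mul_of_one_le_right (by omega) (by omega)
      omega
    · rw [PySem.List.mem_pyRange_iff_of_pos (by omega)]
      refine ⟨by nlinarith, by omega, m - 2, by ring⟩

theorem primeB_iff (n i : Int) (hin : i ≤ n) :
    (decide (2 ≤ i) && !(PySem.Set.contains (pvCompsB n) i)) = true ↔ Nat.Prime i.toNat := by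
  have hmem := pvCompsB_mem n i
  constructor
  · intro h
    rw [Bool.and_eq_true, decide_eq_true_iff, Bool.not_eq_true'] at h
    obtain ⟨h2, hc⟩ := h
    have hnot : ¬ (i ∈ pvCompsB n) := by
      intro hm
      rw [← PySem.Set.contains_iff] at hm
      rw [hm] at hc
      cases hc
    rw [hmem] at hnot
    push Not at hnot
    rw [Nat.prime_def]
    refine ⟨by omega, fun m hdvd => ?_⟩
    obtain ⟨c, hc'⟩ := hdvd
    by_cases hm1 : m = 1
    · exact Or.inl hm1
    right
    by_cases hcz : c = 0
    · rw [hcz, mul_zero] at hc'; omega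
    by_cases hmz : m = 0
    · rw [hmz, zero_mul] at hc'; omega
    by_cases hc1 : c = 1
    · rw [hc1, mul_one] at hc'; omega
    exfalso
    have hcast : ((m:Int)) * ((c:Int)) = ((i.toNat : Int)) := by exact_mod_cast hc'.symm
    rw [Int.toNat_of_nonneg (by omega : (0:Int) ≤ i)] at hcast
    have := hnot (m : Int) (c : Int) (by omega) (by omega) hcast
    omega
  · intro hp
    have h2 : 2 ≤ i.toNat := hp.two_le
    have h2i : 2 ≤ i := by omega
    rw [Bool.and_eq_true, decide_eq_true_iff, Bool.not_eq_true']
    refine ⟨h2i, ?_⟩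
    by_contra hc
    have hctrue : PySem.Set.contains (pvCompsB n) i = true := by
      cases hx : PySem.Set.contains (pvCompsB n) i
      · exact absurd hx hc
      · rfl
    rw [PySem.Set.contains_iff, hmem] at hctrue
    obtain ⟨p, m, hp2, hm2, hpm, _⟩ := hctrue
    have heq : p.toNat * m.toNat = i.toNat := by
      have hq : ((p.toNat * m.toNat : Nat) : Int) = ((i.toNat : Nat) : Int) := by
        push_cast
        rw [Int.toNat_of_nonneg (by omega : (0:Int) ≤ p),
            Int.toNat_of_nonneg (by omega : (0:Int) ≤ m),
            Int.toNat_of_nonneg (by omega : (0:Int) ≤ i)]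
        exact hpm
      exact_mod_cast hq
    rcases (Nat.prime_def.mp hp).2 p.toNat ⟨m.toNat, heq.symm⟩ with h1 | h1
    · omega
    · have hpn : 2 ≤ p.toNat := by omega
      have hmn : 2 ≤ m.toNat := by omega
      nlinarith [heq]

theorem pvPrimesA_contains (n i : Int) (hi : i ∈ PySem.List.pyRange 1 (n+1) 1) :
    PySem.Set.contains (pvPrimesA n) i
      = (pvIsPrimeA i && PySem.Set.contains (pvFibSetA n) i) := by
  apply Bool.coe_iff_coe.mp
  rw [PySem.Set.contains_iff]
  show i ∈ (PySem.List.pyRange 1 (n+1) 1).foldl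
    (fun s i => if pvIsPrimeA i && PySem.Set.contains (pvFibSetA n) i
                then PySem.Set.add s i else s) PySem.Set.empty ↔ _
  rw [PySem.List.foldl_if_eq_foldl_filter
        (fun j => pvIsPrimeA j && PySem.Set.contains (pvFibSetA n) j) PySem.Set.add]
  rw [PySem.Set.mem_foldl_add _ (fun q => q) _ i]
  simp [List.mem_filter, hi, PySem.Set.empty]

theorem pvFibSetA_contains (n i : Int) (h1 : 1 ≤ i) (h2 : i ≤ n)
    (hD : ¬ D_charland_resident_name n) :
    PySem.Set.contains (pvFibSetA n) i = PySem.Set.contains (pvFibsB n) i := by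
  apply Bool.coe_iff_coe.mp
  rw [PySem.Set.contains_iff, PySem.Set.contains_iff]
  unfold pvFibSetA
  rw [PySem.Set.mem_ofList]
  exact fib_mem_agree n i h1 h2 hD

theorem pvIsPrimeA_eq_primeB (n i : Int) (h2 : i ≤ n) :
    pvIsPrimeA i = (decide (2 ≤ i) && !(PySem.Set.contains (pvCompsB n) i)) := by
  by_cases h0 : 0 ≤ i
  · apply Bool.coe_iff_coe.mp
    rw [pvIsPrimeA_iff i h0, primeB_iff n i h2]
  · have hlt : i < 2 := by omega
    unfold pvIsPrimeA
    rw [if_pos hlt, decide_eq_false (by omega), Bool.false_and]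

theorem charland_agree (n : Int) (hD : ¬ D_charland_resident_name n) :
    charland_resident_name n = charland_resident_name_alt n := by
  have hA : charland_resident_name n = String.ofList ((PySem.List.pyRange 1 (n+1) 1).foldl
      (fun cs i =>
        cs ++ [if PySem.Set.contains (pvPrimesA n) i then 'p'
               else if PySem.Set.contains (pvFibSetA n) i then 'O'
               else if pvIsPrimeA i then 'P'
               else 'o']) []) := rfl
  have hB : charland_resident_name_alt n = (if n < 1 then "" else
      PySem.Str.join "" ((PySem.List.pyRange 1 (n+1) 1).map (fun i =>
        let fib := PySem.Set.contains (pvFibsB n) i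
        let prime := decide (2 ≤ i) && !(PySem.Set.contains (pvCompsB n) i)
        if prime && fib then "p" else if fib then "O" else if prime then "P" else "o"))) := rfl
  rw [hA, hB]
  by_cases hn : n < 1
  · rw [if_pos hn, PySem.List.pyRange_one_eq_nil (by omega : n + 1 ≤ 1)]
    rfl
  · rw [if_neg hn]
    rw [PySem.List.foldl_append_singleton_eq_map, List.nil_append]
    have hofl : ∀ (a : List Char) (b : String), a = b.toList → String.ofList a = b := by
      intro a b h; rw [h, String.ofList_toList]
    apply hofl
    rw [PySem.Str.toList_join, List.map_map]
    have hpt : ∀ i ∈ PySem.List.pyRange 1 (n+1) 1,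
        (String.toList ∘ (fun i =>
          let fib := PySem.Set.contains (pvFibsB n) i
          let prime := decide (2 ≤ i) && !(PySem.Set.contains (pvCompsB n) i)
          if prime && fib then "p" else if fib then "O" else if prime then "P" else "o")) i
        = (fun j => [if PySem.Set.contains (pvPrimesA n) j then 'p'
                     else if PySem.Set.contains (pvFibSetA n) j then 'O'
                     else if pvIsPrimeA j then 'P' else 'o']) i := by
      intro i hi
      have h12 := (PySem.List.mem_pyRange_one).mp hi
      simp only [Function.comp_apply]
      rw [pvPrimesA_contains n i hi,
          pvFibSetA_contains n i (by omega) (by omega) hD,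
          pvIsPrimeA_eq_primeB n i (by omega)]
      cases hp : (decide (2 ≤ i) && !(PySem.Set.contains (pvCompsB n) i)) <;>
        cases hf : PySem.Set.contains (pvFibsB n) i <;> rfl
    rw [List.map_congr_left hpt]
    rw [show (fun j => [if PySem.Set.contains (pvPrimesA n) j then 'p'
                     else if PySem.Set.contains (pvFibSetA n) j then 'O'
                     else if pvIsPrimeA j then 'P' else 'o'])
          = (fun c => [c]) ∘ (fun j => if PySem.Set.contains (pvPrimesA n) j then 'p'
                     else if PySem.Set.contains (pvFibSetA n) j then 'O'
                     else if pvIsPrimeA j then 'P' else 'o') from rfl]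
    rw [← List.map_map]
    have hsep : ("" : String).toList = [] := rfl
    rw [hsep, PySem.Chars.join_nil_singletons]

-- ===== VERDICT (by name: the statement is the Claim_ definition above) =====
theorem charland_resident_name_spec : Claim_unchanged_charland_resident_name := by
  intro n _ hD
  exact charland_agree n hD

theorem charland_resident_name_changed : Claim_changed_charland_resident_name := by
  unfold Claim_changed_charland_resident_name; decide

theorem charland_resident_name_tight : Claim_exact_charland_resident_name := by
  unfold Claim_exact_charland_resident_name
  intro n _ hD
  rcases hD with rfl | rfl <;> decide
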